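-- pv_equiv track=rewrite | github.com/zinsmatt/Programming | LeetCode/medium/The_k-th_Lexicographical_String_of_All_Happy_Strings_of_Length_n.py | generate
-- ===== SOURCE A (Python) =====
-- def generate(l, n):
--     if len(l) == n:
--         return [l]
--
--     if l[-1] == 'a':
--         return generate(l+"b", n) + generate(l+"c", n)
--     if l[-1] == 'b':
--         return generate(l+"a", n) + generate(l+"c", n)
--     if l[-1] == 'c':
--         return generate(l+"a", n) + generate(l+"b", n)
-- ===== SOURCE B (Python) =====
-- NEXT = {'a': 'bc', 'b': 'ac', 'c': 'ab'}
--
--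
-- def generate(l, n):
--     stack = [l]
--     result = []
--     while stack:
--         s = stack.pop()
--         if len(s) == n:
--             result.append(s)
--         else:
--             for ch in reversed(NEXT[s[-1]]):
--                 stack.append(s + ch)
--     return result
-- ===== Notes on version B (the rewrite author's own statement) =====
-- stated objective: alternative
-- what changed: Replaced A's branching recursion (three self-recursive calls concatenating sublists) with an explicit LIFO stack DFS driven by a next-letter table, pushing children in reverse so the preorder output is identical.
-- outside the precondition, e.g. on generate('x', 2): A returns None, B raises KeyError
import Mathlib
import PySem

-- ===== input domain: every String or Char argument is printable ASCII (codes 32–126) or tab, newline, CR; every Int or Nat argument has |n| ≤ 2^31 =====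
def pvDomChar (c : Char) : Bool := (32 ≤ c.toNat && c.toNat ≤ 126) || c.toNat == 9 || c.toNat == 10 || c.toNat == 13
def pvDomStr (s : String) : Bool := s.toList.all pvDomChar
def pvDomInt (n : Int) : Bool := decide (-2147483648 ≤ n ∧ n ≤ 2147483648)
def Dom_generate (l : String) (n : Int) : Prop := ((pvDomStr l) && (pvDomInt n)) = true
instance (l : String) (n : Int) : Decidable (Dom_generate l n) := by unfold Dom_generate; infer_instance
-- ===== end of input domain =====

-- B replaces A's three-way branching recursion by an explicit LIFO stack DFS with a
-- next-letter table (same preorder output); objective: alternative decomposition, no speed claim.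


-- ===== PORT A =====
-- A's recursion does not terminate when len(l) > n, so the port carries a fuel counter
-- ((n - len l) + 1 is exactly the recursion depth on every input Pre_ admits); otherwise it is
-- A's code step for step.  Python returns None when the last char is none of a/b/c (and raises
-- IndexError on an empty l with len ≠ n); the port returns [] there — those inputs are outside Pre_.
def generateFuel (n : Int) : Nat → String → List String
  | 0, _ => []
  | f + 1, l =>
    if PySem.Str.len l = n then [l]
    else
      match PySem.Str.pyGet? l (-1) with
      | some 'a' => generateFuel n f (l ++ "b") ++ generateFuel n f (l ++ "c")
      | some 'b' => generateFuel n f (l ++ "a") ++ generateFuel n f (l ++ "c")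
      | some 'c' => generateFuel n f (l ++ "a") ++ generateFuel n f (l ++ "b")
      | _ => []

def generate (l : String) (n : Int) : List String :=
  generateFuel n ((n - PySem.Str.len l).toNat + 1) l

-- ===== PORT B =====
-- B's NEXT table: the two letters allowed after c (none = Python's KeyError, outside Pre_).
def altNext (c : Char) : Option (String × String) :=
  if c = 'a' then some ("b", "c")
  else if c = 'b' then some ("a", "c")
  else if c = 'c' then some ("a", "b")
  else none

-- B's while-loop over the stack (head of the list = top of the Python stack, so the reversed
-- pushes put the leftmost child on top).  B's loop pops one node per iteration and the DFS tree
-- rooted at l has 2^((n - len l) + 1) - 1 nodes on every input Pre_ admits, so that is the fuel.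
def altLoop (n : Int) : Nat → List String → List String → List String
  | 0, _, result => result
  | _ + 1, [], result => result
  | f + 1, s :: stack, result =>
    if PySem.Str.len s = n then altLoop n f stack (result ++ [s])
    else
      match PySem.Str.pyGet? s (-1) with
      | some c =>
        match altNext c with
        | some (c1, c2) => altLoop n f ((s ++ c1) :: (s ++ c2) :: stack) result
        | none => result
      | none => result

def generate_alt (l : String) (n : Int) : List String :=
  altLoop n (2 ^ ((n - PySem.Str.len l).toNat + 1)) [l] []

-- ===== PRECONDITION & SPEC =====
-- Pre_ excludes the inputs on which A does not return a list: empty l with len(l) ≠ n (IndexError),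
-- len(l) > n (A recurses forever), and a last character other than a/b/c with len(l) ≠ n, where A
-- falls off the end and returns None (B raises KeyError there).
def Pre_generate (l : String) (n : Int) : Prop :=
  (l.toList.length : Int) = n ∨
    ((l.toList.length : Int) < n ∧
      (l.toList.getLast? = some 'a' ∨ l.toList.getLast? = some 'b' ∨ l.toList.getLast? = some 'c'))
instance (l : String) (n : Int) : Decidable (Pre_generate l n) := by
  unfold Pre_generate; infer_instance

def pvWitness_generate : String × Int := ("a", 3)

def Spec_generate (l : String) (n : Int) (out : List String) : Prop := out = generate_alt l n
instance (l : String) (n : Int) (out : List String) : Decidable (Spec_generate l n out) := by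
  unfold Spec_generate; infer_instance

-- ===== CLAIM (what is proved, stated in full; the proofs are below) =====
def Claim_equal_generate : Prop :=
  ∀ (l : String) (n : Int), Dom_generate l n → Pre_generate l n → Spec_generate l n (generate l n)

-- ===== LEMMAS AND PROOFS =====

-- The reference tree: specGen d l is the happy-string list below prefix l at remaining depth d.
def specGen : Nat → String → List String
  | 0, l => [l]
  | d + 1, l =>
    match l.toList.getLast? with
    | some 'a' => specGen d (l ++ "b") ++ specGen d (l ++ "c")
    | some 'b' => specGen d (l ++ "a") ++ specGen d (l ++ "c")
    | some 'c' => specGen d (l ++ "a") ++ specGen d (l ++ "b")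
    | _ => []

-- last character / length of l ++ one-letter literal
theorem getLast?_append_singleton (l t : String) (c : Char) (h : t.toList = [c]) :
    (l ++ t).toList.getLast? = some c := by
  simp [String.toList_append, h]

theorem length_append_singleton (l t : String) (c : Char) (h : t.toList = [c]) :
    ((l ++ t).toList.length : Int) = (l.toList.length : Int) + 1 := by
  simp [String.toList_append, h]

-- A's fuelled recursion computes specGen once the fuel exceeds the remaining depth.
theorem strLen_eq_toList (s : String) : PySem.Str.len s = (s.toList.length : Int) := by
  simp [PySem.Str.len_eq]

theorem strPyGet_neg_one (s : String) : PySem.Str.pyGet? s (-1) = s.toList.getLast? := by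
  simp [PySem.Str.pyGet?, PySem.List.pyGet?_neg_one]

theorem generateFuel_eq_specGen (n : Int) (d : Nat) :
    ∀ (l : String) (f : Nat), (n - (l.toList.length : Int)).toNat = d →
      (l.toList.length : Int) ≤ n →
      (d = 0 ∨ (l.toList.getLast? = some 'a' ∨ l.toList.getLast? = some 'b' ∨
        l.toList.getLast? = some 'c')) →
      d < f → generateFuel n f l = specGen d l := by
  induction d with
  | zero =>
    intro l f hd hle _ hf
    have hlen : (l.toList.length : Int) = n := by omega
    obtain ⟨f', rfl⟩ : ∃ f', f = f' + 1 := ⟨f - 1, by omega⟩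
    simp only [generateFuel, strLen_eq_toList, if_pos hlen, specGen]
  | succ d ih =>
    intro l f hd hle hgood hf
    have hlt : (l.toList.length : Int) < n := by omega
    obtain ⟨f', rfl⟩ : ∃ f', f = f' + 1 := ⟨f - 1, by omega⟩
    have hne : ¬ ((l.toList.length : Int) = n) := by omega
    have hb := length_append_singleton l "b" 'b' rfl
    have hc := length_append_singleton l "c" 'c' rfl
    have ha := length_append_singleton l "a" 'a' rfl
    rcases hgood.resolve_left (by omega) with h | h | h
    · simp only [generateFuel, strLen_eq_toList, if_neg hne, strPyGet_neg_one, h, specGen]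
      rw [ih (l ++ "b") f' (by omega) (by omega)
            (Or.inr (Or.inr (Or.inl (getLast?_append_singleton l "b" 'b' rfl)))) (by omega),
          ih (l ++ "c") f' (by omega) (by omega)
            (Or.inr (Or.inr (Or.inr (getLast?_append_singleton l "c" 'c' rfl)))) (by omega)]
    · simp only [generateFuel, strLen_eq_toList, if_neg hne, strPyGet_neg_one, h, specGen]
      rw [ih (l ++ "a") f' (by omega) (by omega)
            (Or.inr (Or.inl (getLast?_append_singleton l "a" 'a' rfl))) (by omega),
          ih (l ++ "c") f' (by omega) (by omega)
            (Or.inr (Or.inr (Or.inr (getLast?_append_singleton l "c" 'c' rfl)))) (by omega)]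
    · simp only [generateFuel, strLen_eq_toList, if_neg hne, strPyGet_neg_one, h, specGen]
      rw [ih (l ++ "a") f' (by omega) (by omega)
            (Or.inr (Or.inl (getLast?_append_singleton l "a" 'a' rfl))) (by omega),
          ih (l ++ "b") f' (by omega) (by omega)
            (Or.inr (Or.inr (Or.inl (getLast?_append_singleton l "b" 'b' rfl)))) (by omega)]

-- Each stack entry's subtree size; B pops exactly this many times for the entry.
def weight (n : Int) (s : String) : Nat := 2 ^ ((n - (s.toList.length : Int)).toNat + 1) - 1

def goodEntry (n : Int) (s : String) : Prop :=
  (s.toList.length : Int) ≤ n ∧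
    ((s.toList.length : Int) = n ∨ (s.toList.getLast? = some 'a' ∨
      s.toList.getLast? = some 'b' ∨ s.toList.getLast? = some 'c'))

theorem altNext_a : altNext 'a' = some ("b", "c") := by decide
theorem altNext_b : altNext 'b' = some ("a", "c") := by decide
theorem altNext_c : altNext 'c' = some ("a", "b") := by decide

theorem weight_pos (n : Int) (s : String) : 1 ≤ weight n s := by
  have h3 : 1 ≤ (2:Nat) ^ ((n - (s.toList.length : Int)).toNat + 1) := Nat.one_le_two_pow
  have h2 : (2:Nat) ^ ((n - (s.toList.length : Int)).toNat + 1) =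
      2 * 2 ^ (n - (s.toList.length : Int)).toNat := by ring
  have h1 : 1 ≤ (2:Nat) ^ (n - (s.toList.length : Int)).toNat := Nat.one_le_two_pow
  unfold weight; omega

-- B's loop folds specGen over the stack, front to back, given enough fuel.
theorem altLoop_eq (n : Int) :
    ∀ (f : Nat) (stack result : List String), (∀ s ∈ stack, goodEntry n s) →
      (stack.map (weight n)).sum ≤ f →
      altLoop n f stack result =
        result ++ (stack.map (fun s => specGen (n - (s.toList.length : Int)).toNat s)).flatten := by
  intro f
  induction f with
  | zero =>
    intro stack result _ hsum
    match stack with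
    | [] => simp [altLoop]
    | s :: rest =>
      exfalso
      have h1 := weight_pos n s
      simp [List.map_cons] at hsum
      omega
  | succ f ih =>
    intro stack result hgood hsum
    match stack with
    | [] => simp [altLoop]
    | s :: rest =>
      have hg := hgood s (by simp)
      have hrest : ∀ t ∈ rest, goodEntry n t := fun t ht => hgood t (by simp [ht])
      have hw1 := weight_pos n s
      simp only [List.map_cons, List.sum_cons] at hsum
      by_cases hs : (s.toList.length : Int) = n
      · have hd0 : (n - (s.toList.length : Int)).toNat = 0 := by omega
        have hsum' : (rest.map (weight n)).sum ≤ f := by omega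
        simp only [altLoop, strLen_eq_toList, if_pos hs, ih rest (result ++ [s]) hrest hsum',
          List.map_cons, hd0, specGen, List.flatten_cons, List.append_assoc, List.cons_append,
          List.nil_append]
      · have hlt : (s.toList.length : Int) < n := lt_of_le_of_ne hg.1 hs
        obtain ⟨m, hm⟩ : ∃ m, (n - (s.toList.length : Int)).toNat = m + 1 :=
          ⟨(n - (s.toList.length : Int)).toNat - 1, by omega⟩
        have hsum' : ∀ (t u : String), (t.toList.length : Int) = (s.toList.length : Int) + 1 →
            ((u.toList.length : Int)) = (s.toList.length : Int) + 1 →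
            (weight n t + (weight n u + (rest.map (weight n)).sum)) ≤ f := by
          intro t u ht hu
          have hxt : (n - (t.toList.length : Int)).toNat = m := by omega
          have hxu : (n - (u.toList.length : Int)).toNat = m := by omega
          have hwt : weight n t = 2 ^ (m + 1) - 1 := by unfold weight; rw [hxt]
          have hwu : weight n u = 2 ^ (m + 1) - 1 := by unfold weight; rw [hxu]
          have hws : weight n s = 2 ^ (m + 2) - 1 := by unfold weight; rw [hm]
          have hp : (2:Nat) ^ (m + 2) = 2 * 2 ^ (m + 1) := by ring
          have h1 : 1 ≤ (2:Nat) ^ (m + 1) := Nat.one_le_two_pow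
          omega
        rcases hg.2.resolve_left hs with h | h | h
        · have e1 := length_append_singleton s "b" 'b' rfl
          have e2 := length_append_singleton s "c" 'c' rfl
          simp only [altLoop, strLen_eq_toList, if_neg hs, strPyGet_neg_one, h, altNext_a]
          rw [ih ((s ++ "b") :: (s ++ "c") :: rest) result
              (by
                intro t ht
                simp only [List.mem_cons] at ht
                rcases ht with rfl | rfl | ht
                · exact ⟨by omega, Or.inr (Or.inr (Or.inl (getLast?_append_singleton s "b" 'b' rfl)))⟩
                · exact ⟨by omega, Or.inr (Or.inr (Or.inr (getLast?_append_singleton s "c" 'c' rfl)))⟩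
                · exact hrest t ht)
              (by simpa using hsum' _ _ e1 e2)]
          have d1 : (n - ((s ++ "b").toList.length : Int)).toNat = m := by omega
          have d2 : (n - ((s ++ "c").toList.length : Int)).toNat = m := by omega
          simp only [List.map_cons, List.flatten_cons, d1, d2, hm, specGen, h, List.append_assoc]
        · have e1 := length_append_singleton s "a" 'a' rfl
          have e2 := length_append_singleton s "c" 'c' rfl
          simp only [altLoop, strLen_eq_toList, if_neg hs, strPyGet_neg_one, h, altNext_b]
          rw [ih ((s ++ "a") :: (s ++ "c") :: rest) result
              (by
                intro t ht
                simp only [List.mem_cons] at ht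
                rcases ht with rfl | rfl | ht
                · exact ⟨by omega, Or.inr (Or.inl (getLast?_append_singleton s "a" 'a' rfl))⟩
                · exact ⟨by omega, Or.inr (Or.inr (Or.inr (getLast?_append_singleton s "c" 'c' rfl)))⟩
                · exact hrest t ht)
              (by simpa using hsum' _ _ e1 e2)]
          have d1 : (n - ((s ++ "a").toList.length : Int)).toNat = m := by omega
          have d2 : (n - ((s ++ "c").toList.length : Int)).toNat = m := by omega
          simp only [List.map_cons, List.flatten_cons, d1, d2, hm, specGen, h, List.append_assoc]
        · have e1 := length_append_singleton s "a" 'a' rfl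
          have e2 := length_append_singleton s "b" 'b' rfl
          simp only [altLoop, strLen_eq_toList, if_neg hs, strPyGet_neg_one, h, altNext_c]
          rw [ih ((s ++ "a") :: (s ++ "b") :: rest) result
              (by
                intro t ht
                simp only [List.mem_cons] at ht
                rcases ht with rfl | rfl | ht
                · exact ⟨by omega, Or.inr (Or.inl (getLast?_append_singleton s "a" 'a' rfl))⟩
                · exact ⟨by omega, Or.inr (Or.inr (Or.inl (getLast?_append_singleton s "b" 'b' rfl)))⟩
                · exact hrest t ht)
              (by simpa using hsum' _ _ e1 e2)]
          have d1 : (n - ((s ++ "a").toList.length : Int)).toNat = m := by omega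
          have d2 : (n - ((s ++ "b").toList.length : Int)).toNat = m := by omega
          simp only [List.map_cons, List.flatten_cons, d1, d2, hm, specGen, h, List.append_assoc]

-- ===== VERDICT (by name: the statement is the Claim_ definition above) =====
theorem generate_spec : Claim_equal_generate := by
  intro l n _ hpre
  show generate l n = generate_alt l n
  have hle : (l.toList.length : Int) ≤ n := by
    rcases hpre with h | ⟨h, _⟩ <;> omega
  have hgood : (n - (l.toList.length : Int)).toNat = 0 ∨
      (l.toList.getLast? = some 'a' ∨ l.toList.getLast? = some 'b' ∨
        l.toList.getLast? = some 'c') := by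
    rcases hpre with h | ⟨_, h⟩
    · left; omega
    · right; exact h
  have hA : generate l n = specGen (n - (l.toList.length : Int)).toNat l := by
    unfold generate
    rw [strLen_eq_toList]
    exact generateFuel_eq_specGen n _ l _ rfl hle hgood (by omega)
  have hB : generate_alt l n = specGen (n - (l.toList.length : Int)).toNat l := by
    unfold generate_alt
    rw [strLen_eq_toList]
    rw [altLoop_eq n _ [l] []
        (by intro t ht; simp at ht; subst ht
            exact ⟨hle, by rcases hpre with h | ⟨_, h⟩ <;> [exact Or.inl h; exact Or.inr h]⟩)
        (by
          have h1 := weight_pos n l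
          have h3 : weight n l ≤ 2 ^ ((n - (l.toList.length : Int)).toNat + 1) :=
            Nat.sub_le _ _
          simpa using h3)]
    simp
  rw [hA, hB]
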